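-- pv_equiv track=rewrite | github.com/Sunwoo0110/Algorithm | 프로그래머스/2/86971. 전력망을 둘로 나누기/전력망을 둘로 나누기.py | solution
-- ===== SOURCE A (Python) =====
-- from collections import defaultdict
--
-- def solution(n, wires):
--     answer = 100
--     visited = set()
--
--     def dfs(node, graph):
--         stack = [node]
--
--         while stack:
--             current = stack.pop()
--
--             for next_node in graph[current]:
--                 if next_node not in visited:
--                     stack.append(next_node)
--                     visited.add(next_node)
--
--     for i in range(len(wires)):
--         ## 새로운 그래프 생성
--         graph = defaultdict(list)
--         visited = set()
--         visited.add(1)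
--
--         for j in range(len(wires)):
--             if i != j:
--                 graph[wires[j][0]].append(wires[j][1])
--                 graph[wires[j][1]].append(wires[j][0])
--
--         dfs(1, graph)
--         gap = abs(n - 2 * len(visited))
--         answer = min(answer, gap)
--
--     return answer
-- ===== SOURCE B (Python) =====
-- def solution(n, wires):
--     m = len(wires)
--     best = 100
--     for i in range(m):
--         comp = {1}
--         # saturation: sweep the edge list (skipping wire i) until a fixpoint;
--         # 2*m + 2 passes always suffice (the component has at most 2*m + 1 nodes)
--         for _ in range(2 * m + 2):
--             nxt = set(comp)
--             for j in range(m):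
--                 if j != i:
--                     w = wires[j]
--                     if w[0] in nxt:
--                         nxt.add(w[1])
--                     if w[1] in nxt:
--                         nxt.add(w[0])
--             if len(nxt) == len(comp):
--                 break
--             comp = nxt
--         best = min(best, abs(n - 2 * len(comp)))
--     return best
-- ===== Notes on version B (the rewrite author's own statement) =====
-- stated objective: alternative
-- what changed: Per removed wire, A rebuilds an adjacency defaultdict and runs a stack DFS from node 1; B never builds a graph: it grows the component of 1 by repeatedly sweeping the raw edge list until a fixpoint (Bellman-Ford-style saturation).
import Mathlib
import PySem

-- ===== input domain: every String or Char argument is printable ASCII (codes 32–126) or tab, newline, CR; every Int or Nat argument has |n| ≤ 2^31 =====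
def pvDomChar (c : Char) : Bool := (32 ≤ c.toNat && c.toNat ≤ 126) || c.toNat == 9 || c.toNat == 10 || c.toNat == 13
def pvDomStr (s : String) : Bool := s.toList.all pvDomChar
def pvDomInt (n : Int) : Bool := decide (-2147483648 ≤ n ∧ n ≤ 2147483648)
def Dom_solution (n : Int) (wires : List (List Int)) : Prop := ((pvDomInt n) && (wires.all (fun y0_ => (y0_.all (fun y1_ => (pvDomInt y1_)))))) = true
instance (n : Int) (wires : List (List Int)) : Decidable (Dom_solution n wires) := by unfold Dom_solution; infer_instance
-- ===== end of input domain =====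

-- B replaces A's per-edge rebuilt adjacency dict + stack DFS by a fixpoint saturation
-- over the raw edge list (objective: alternative algorithm, similar cost).

-- ===== PORT A =====
-- Python stack: list end = top; modelled with the Lean list HEAD as top (push = cons, pop = head).
def pvA_step (sv : List Int × PySem.Set Int) (nx : Int) : List Int × PySem.Set Int :=
  if PySem.Set.contains sv.2 nx then sv else (nx :: sv.1, PySem.Set.add sv.2 nx)

-- the two statements 'graph[a].append(b); graph[b].append(a)' (defaultdict(list))
def pvA_addEdge (g : PySem.Dict Int (List Int)) (a b : Int) : PySem.Dict Int (List Int) :=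
  (g.insert a (g.getD a [] ++ [b])).insert b ((g.insert a (g.getD a [] ++ [b])).getD b [] ++ [a])

def pvA_graph (wires : List (List Int)) (i : Int) : PySem.Dict Int (List Int) :=
  (PySem.List.pyRange 0 wires.length 1).foldl (fun g j =>
    if j ≠ i then
      pvA_addEdge g (PySem.List.pyGetD (PySem.List.pyGetD wires j []) 0 0)
                    (PySem.List.pyGetD (PySem.List.pyGetD wires j []) 1 0)
    else g) PySem.Dict.empty

-- the 'while stack:' loop; the fuel only makes the loop total (4*m+2 provably suffices)
def pvA_dfs (graph : PySem.Dict Int (List Int)) : Nat → List Int → PySem.Set Int → PySem.Set Int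
  | 0, _, visited => visited
  | _ + 1, [], visited => visited
  | fuel + 1, cur :: rest, visited =>
    let sv := (graph.getD cur []).foldl pvA_step (rest, visited)
    pvA_dfs graph fuel sv.1 sv.2

def solution (n : Int) (wires : List (List Int)) : Int :=
  (PySem.List.pyRange 0 wires.length 1).foldl (fun answer i =>
    let graph := pvA_graph wires i
    let visited := PySem.Set.add PySem.Set.empty 1
    let visited := pvA_dfs graph (4 * wires.length + 2) [1] visited
    min answer |n - 2 * (visited.length : Int)|) 100

-- ===== PORT B =====
def pvB_step (wires : List (List Int)) (i : Int) (nxt : PySem.Set Int) (j : Int) : PySem.Set Int :=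
  if j ≠ i then
    let w := PySem.List.pyGetD wires j []
    let nxt := if PySem.Set.contains nxt (PySem.List.pyGetD w 0 0)
               then PySem.Set.add nxt (PySem.List.pyGetD w 1 0) else nxt
    if PySem.Set.contains nxt (PySem.List.pyGetD w 1 0)
    then PySem.Set.add nxt (PySem.List.pyGetD w 0 0) else nxt
  else nxt

-- one sweep over the edge list ('nxt = set(comp)' copies, then the two membership tests)
def pvB_pass (wires : List (List Int)) (i : Int) (comp : PySem.Set Int) : PySem.Set Int :=
  (PySem.List.pyRange 0 wires.length 1).foldl (pvB_step wires i) comp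

-- 'for _ in range(2*m+2): … if len(nxt) == len(comp): break; comp = nxt'
def pvB_iter (wires : List (List Int)) (i : Int) : Nat → PySem.Set Int → PySem.Set Int
  | 0, comp => comp
  | fuel + 1, comp =>
    let nxt := pvB_pass wires i comp
    if nxt.length = comp.length then comp else pvB_iter wires i fuel nxt

def solution_alt (n : Int) (wires : List (List Int)) : Int :=
  (PySem.List.pyRange 0 wires.length 1).foldl (fun best i =>
    let comp := pvB_iter wires i (2 * wires.length + 2) (PySem.Set.ofList [1])
    min best |n - 2 * (comp.length : Int)|) 100

-- ===== PRECONDITION & SPEC =====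
-- Pre_ excludes exactly the inputs where Python A raises IndexError: with ≥ 2 wires every
-- wire gets indexed by wires[j][0]/wires[j][1], so all wires need length ≥ 2; with ≤ 1 wire
-- no wire is ever indexed and A returns regardless.
def Pre_solution (n : Int) (wires : List (List Int)) : Prop :=
  wires.length ≤ 1 ∨ ∀ w ∈ wires, 2 ≤ w.length
instance (n : Int) (wires : List (List Int)) : Decidable (Pre_solution n wires) := by
  unfold Pre_solution; infer_instance

def pvWitness_solution : Int × List (List Int) := (4, [[1, 2], [2, 3], [3, 4]])

def Spec_solution (n : Int) (wires : List (List Int)) (out : Int) : Prop := out = solution_alt n wires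
instance (n : Int) (wires : List (List Int)) (out : Int) : Decidable (Spec_solution n wires out) := by
  unfold Spec_solution; infer_instance

-- ===== CLAIM (what is proved, stated in full; the proofs are below) =====
def Claim_equal_solution : Prop := ∀ (n : Int) (wires : List (List Int)), Dom_solution n wires → Pre_solution n wires → Spec_solution n wires (solution n wires)

-- ===== LEMMAS AND PROOFS =====

-- endpoints of wire j (totalised exactly as the ports read them)
def pvW0 (wires : List (List Int)) (j : Int) : Int :=
  PySem.List.pyGetD (PySem.List.pyGetD wires j []) 0 0
def pvW1 (wires : List (List Int)) (j : Int) : Int :=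
  PySem.List.pyGetD (PySem.List.pyGetD wires j []) 1 0

-- S is closed under every kept wire (both directions)
def pvClosed (wires : List (List Int)) (i : Int) (S : List Int) : Prop :=
  ∀ j ∈ PySem.List.pyRange 0 wires.length 1, j ≠ i →
    (pvW0 wires j ∈ S → pvW1 wires j ∈ S) ∧ (pvW1 wires j ∈ S → pvW0 wires j ∈ S)

-- node universe: 1 together with all wire endpoints
def pvN (wires : List (List Int)) : PySem.Set Int :=
  PySem.Set.ofList (1 :: (PySem.List.pyRange 0 wires.length 1).flatMap
    (fun j => [pvW0 wires j, pvW1 wires j]))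

theorem pvN_one (wires : List (List Int)) : (1 : Int) ∈ pvN wires := by
  simp [pvN, PySem.Set.mem_ofList]

theorem pvN_w0 (wires : List (List Int)) (j : Int)
    (hj : j ∈ PySem.List.pyRange 0 wires.length 1) : pvW0 wires j ∈ pvN wires := by
  simp only [pvN, PySem.Set.mem_ofList, List.mem_cons, List.mem_flatMap]
  exact Or.inr ⟨j, hj, by simp⟩

theorem pvN_w1 (wires : List (List Int)) (j : Int)
    (hj : j ∈ PySem.List.pyRange 0 wires.length 1) : pvW1 wires j ∈ pvN wires := by
  simp only [pvN, PySem.Set.mem_ofList, List.mem_cons, List.mem_flatMap]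
  exact Or.inr ⟨j, hj, by simp⟩

theorem pvN_len (wires : List (List Int)) : (pvN wires).length ≤ 2 * wires.length + 1 := by
  refine le_trans (PySem.Set.length_ofList_le _) ?_
  simp [List.length_flatMap, PySem.List.length_pyRange_one]
  omega

-- effect of one 'graph[a].append(b); graph[b].append(a)' on adjacency membership
theorem pv_addEdge_mem (g : PySem.Dict Int (List Int)) (a b u v : Int) :
    v ∈ (pvA_addEdge g a b).getD u [] ↔
      (v ∈ g.getD u [] ∨ (u = a ∧ v = b) ∨ (u = b ∧ v = a)) := by
  simp only [pvA_addEdge, PySem.Dict.getD_insert]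
  by_cases hub : u = b <;> by_cases hua : u = a <;> by_cases hba : b = a <;>
    simp_all [List.mem_append]

-- membership in A's adjacency dict = "some kept wire joins u and v"
theorem pvA_graph_mem (wires : List (List Int)) (i u v : Int) :
    v ∈ (pvA_graph wires i).getD u [] ↔
      ∃ j, j ∈ PySem.List.pyRange 0 wires.length 1 ∧ j ≠ i ∧
        ((u = pvW0 wires j ∧ v = pvW1 wires j) ∨ (u = pvW1 wires j ∧ v = pvW0 wires j)) := by
  suffices h : ∀ (t : Nat) (u v : Int),
      v ∈ ((PySem.List.pyRange 0 (t : Int) 1).foldl (fun g j =>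
        if j ≠ i then
          pvA_addEdge g (PySem.List.pyGetD (PySem.List.pyGetD wires j []) 0 0)
                        (PySem.List.pyGetD (PySem.List.pyGetD wires j []) 1 0)
        else g) PySem.Dict.empty).getD u [] ↔
      ∃ j, j ∈ PySem.List.pyRange 0 (t : Int) 1 ∧ j ≠ i ∧
        ((u = pvW0 wires j ∧ v = pvW1 wires j) ∨ (u = pvW1 wires j ∧ v = pvW0 wires j)) by
    exact h wires.length u v
  intro t
  induction t with
  | zero =>
    intro u v
    simp [PySem.Dict.getD_empty]
  | succ t ih =>
    intro u v
    have hsplit : PySem.List.pyRange 0 ((t + 1 : Nat) : Int) 1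
        = PySem.List.pyRange 0 (t : Int) 1 ++ [(t : Int)] := by
      push_cast
      exact PySem.List.pyRange_one_succ_right (by positivity)
    rw [hsplit, List.foldl_append]
    simp only [List.foldl_cons, List.foldl_nil, List.mem_append, List.mem_singleton]
    by_cases hti : (t : Int) ≠ i
    · rw [if_pos hti, pv_addEdge_mem, ih]
      constructor
      · rintro (⟨j, hj, hji, hm⟩ | ⟨hu, hv⟩ | ⟨hu, hv⟩)
        · exact ⟨j, Or.inl hj, hji, hm⟩
        · exact ⟨(t : Int), Or.inr rfl, hti, Or.inl ⟨hu, hv⟩⟩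
        · exact ⟨(t : Int), Or.inr rfl, hti, Or.inr ⟨hu, hv⟩⟩
      · rintro ⟨j, hj | hj, hji, hm⟩
        · exact Or.inl ⟨j, hj, hji, hm⟩
        · subst hj
          rcases hm with ⟨hu, hv⟩ | ⟨hu, hv⟩
          · exact Or.inr (Or.inl ⟨hu, hv⟩)
          · exact Or.inr (Or.inr ⟨hu, hv⟩)
    · rw [if_neg hti, ih]
      rw [not_not] at hti
      constructor
      · rintro ⟨j, hj, hji, hm⟩
        exact ⟨j, Or.inl hj, hji, hm⟩
      · rintro ⟨j, hj | hj, hji, hm⟩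
        · exact ⟨j, hj, hji, hm⟩
        · exact (hji (hj.trans hti)).elim

theorem pvA_step_of_mem (stack : List Int) (visited : PySem.Set Int) (x : Int)
    (h : x ∈ visited) : pvA_step (stack, visited) x = (stack, visited) := by
  simp [pvA_step, h]

theorem pvA_step_of_not_mem (stack : List Int) (visited : PySem.Set Int) (x : Int)
    (h : x ∉ visited) : pvA_step (stack, visited) x = (x :: stack, visited ++ [x]) := by
  have hc : PySem.Set.contains visited x = false := by
    by_contra hc'
    exact h ((PySem.Set.contains_iff _ _).1 (by simpa using hc'))
  simp [pvA_step, h]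

-- combined invariant of the neighbour-pushing fold
theorem pvA_push_spec (ns stack : List Int) (visited : PySem.Set Int) :
    (∀ x ∈ visited, x ∈ (ns.foldl pvA_step (stack, visited)).2) ∧
    (∀ x ∈ (ns.foldl pvA_step (stack, visited)).2, x ∈ visited ∨ x ∈ ns) ∧
    (∀ x ∈ ns, x ∈ (ns.foldl pvA_step (stack, visited)).2) ∧
    (∀ x ∈ (ns.foldl pvA_step (stack, visited)).2, x ∈ visited ∨ x ∈ (ns.foldl pvA_step (stack, visited)).1) ∧
    (∀ x ∈ stack, x ∈ (ns.foldl pvA_step (stack, visited)).1) ∧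
    (∀ x ∈ (ns.foldl pvA_step (stack, visited)).1, x ∈ stack ∨ x ∈ (ns.foldl pvA_step (stack, visited)).2) ∧
    (visited.Nodup → (ns.foldl pvA_step (stack, visited)).2.Nodup) ∧
    ((ns.foldl pvA_step (stack, visited)).1.length + visited.length
       = stack.length + (ns.foldl pvA_step (stack, visited)).2.length) ∧
    (stack.length ≤ (ns.foldl pvA_step (stack, visited)).1.length) := by
  induction ns generalizing stack visited with
  | nil =>
    exact ⟨fun x h => h, fun x h => Or.inl h, by simp, fun x h => Or.inl h,
      fun x h => h, fun x h => Or.inl h, fun h => h, rfl, le_refl _⟩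
  | cons x ns ih =>
    simp only [List.foldl_cons]
    by_cases hx : x ∈ visited
    · rw [pvA_step_of_mem _ _ _ hx]
      obtain ⟨p1, p2, p3, p4, p5, p6, p7, p8, p9⟩ := ih stack visited
      refine ⟨p1, fun y hy => (p2 y hy).imp_right (List.mem_cons_of_mem x), ?_, p4, p5, p6, p7, p8, p9⟩
      intro y hy
      rcases List.mem_cons.1 hy with rfl | hy
      · exact p1 y hx
      · exact p3 y hy
    · rw [pvA_step_of_not_mem _ _ _ hx]
      obtain ⟨p1, p2, p3, p4, p5, p6, p7, p8, p9⟩ := ih (x :: stack) (visited ++ [x])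
      have hxin : x ∈ (ns.foldl pvA_step (x :: stack, visited ++ [x])).2 :=
        p1 x (List.mem_append_right _ (List.mem_singleton.2 rfl))
      refine ⟨?_, ?_, ?_, ?_, ?_, ?_, ?_, by simp at p8; omega, by simp at p9; omega⟩
      · exact fun y hy => p1 y (List.mem_append_left _ hy)
      · intro y hy
        rcases p2 y hy with h | h
        · rcases List.mem_append.1 h with h' | h'
          · exact Or.inl h'
          · exact Or.inr (List.mem_cons.2 (Or.inl (List.mem_singleton.1 h')))
        · exact Or.inr (List.mem_cons_of_mem x h)
      · intro y hy
        rcases List.mem_cons.1 hy with rfl | hy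
        · exact hxin
        · exact p3 y hy
      · intro y hy
        rcases p4 y hy with h | h
        · rcases List.mem_append.1 h with h' | h'
          · exact Or.inl h'
          · exact Or.inr (List.mem_singleton.1 h' ▸ p5 x List.mem_cons_self)
        · exact Or.inr h
      · exact fun y hy => p5 y (List.mem_cons_of_mem x hy)
      · intro y hy
        rcases p6 y hy with h | h
        · rcases List.mem_cons.1 h with rfl | h'
          · exact Or.inr hxin
          · exact Or.inl h'
        · exact Or.inr h
      · intro hnd
        exact p7 (List.Nodup.append hnd (List.nodup_singleton x)
          (List.disjoint_singleton.2 hx))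

-- DFS soundness: the result stays inside any graph-closed superset
theorem pvA_dfs_subset (graph : PySem.Dict Int (List Int)) (S : List Int)
    (hS : ∀ u ∈ S, ∀ v ∈ graph.getD u [], v ∈ S) :
    ∀ (fuel : Nat) (stack : List Int) (visited : PySem.Set Int),
      (∀ x ∈ stack, x ∈ S) → (∀ x ∈ visited, x ∈ S) →
      ∀ x ∈ pvA_dfs graph fuel stack visited, x ∈ S := by
  intro fuel
  induction fuel with
  | zero => intro stack visited _ hv; exact hv
  | succ fuel ih =>
    intro stack visited hst hv
    match stack with
    | [] => exact hv
    | cur :: rest =>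
      obtain ⟨p1, p2, p3, p4, p5, p6, p7, p8, p9⟩ :=
        pvA_push_spec (graph.getD cur []) rest visited
      have hv2 : ∀ x ∈ ((graph.getD cur []).foldl pvA_step (rest, visited)).2, x ∈ S := by
        intro x hx
        rcases p2 x hx with h | h
        · exact hv x h
        · exact hS cur (hst cur List.mem_cons_self) x h
      have hs2 : ∀ x ∈ ((graph.getD cur []).foldl pvA_step (rest, visited)).1, x ∈ S := by
        intro x hx
        rcases p6 x hx with h | h
        · exact hst x (List.mem_cons_of_mem cur h)
        · exact hv2 x h
      exact ih _ _ hs2 hv2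

-- DFS completeness: with enough fuel the final visited set is graph-closed
theorem pvA_dfs_spec (graph : PySem.Dict Int (List Int)) (N : List Int)
    (hN : ∀ u v, v ∈ graph.getD u [] → v ∈ N) :
    ∀ (fuel : Nat) (stack : List Int) (visited : PySem.Set Int),
      visited.Nodup →
      (∀ x ∈ stack, x ∈ visited) →
      (∀ x ∈ visited, x ∈ N) →
      (∀ u ∈ visited, u ∉ stack → ∀ v ∈ graph.getD u [], v ∈ visited) →
      2 * N.length + stack.length ≤ fuel + 2 * visited.length →
      (∀ x ∈ visited, x ∈ pvA_dfs graph fuel stack visited) ∧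
      (pvA_dfs graph fuel stack visited).Nodup ∧
      (∀ u ∈ pvA_dfs graph fuel stack visited, ∀ v ∈ graph.getD u [], v ∈ pvA_dfs graph fuel stack visited) := by
  intro fuel
  induction fuel with
  | zero =>
    intro stack visited hnd hsv hvN hcl hfuel
    have hlen : visited.length ≤ N.length := (hnd.subperm hvN).length_le
    have hstack : stack = [] := List.eq_nil_of_length_eq_zero (by omega)
    subst hstack
    exact ⟨fun x h => h, hnd, fun u hu v hv => hcl u hu (by simp) v hv⟩
  | succ fuel ih =>
    intro stack visited hnd hsv hvN hcl hfuel
    match stack with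
    | [] =>
      exact ⟨fun x h => h, hnd, fun u hu v hv => hcl u hu (by simp) v hv⟩
    | cur :: rest =>
      obtain ⟨p1, p2, p3, p4, p5, p6, p7, p8, p9⟩ :=
        pvA_push_spec (graph.getD cur []) rest visited
      show (∀ x ∈ visited, x ∈ pvA_dfs graph fuel _ _) ∧ _
      have hsv' : ∀ x ∈ ((graph.getD cur []).foldl pvA_step (rest, visited)).1,
          x ∈ ((graph.getD cur []).foldl pvA_step (rest, visited)).2 := by
        intro x hx
        rcases p6 x hx with h | h
        · exact p1 x (hsv x (List.mem_cons_of_mem cur h))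
        · exact h
      have hvN' : ∀ x ∈ ((graph.getD cur []).foldl pvA_step (rest, visited)).2, x ∈ N := by
        intro x hx
        rcases p2 x hx with h | h
        · exact hvN x h
        · exact hN cur x h
      have hcl' : ∀ u ∈ ((graph.getD cur []).foldl pvA_step (rest, visited)).2,
          u ∉ ((graph.getD cur []).foldl pvA_step (rest, visited)).1 →
          ∀ v ∈ graph.getD u [], v ∈ ((graph.getD cur []).foldl pvA_step (rest, visited)).2 := by
        intro u hu hnotst v hv
        have huv : u ∈ visited := by
          rcases p4 u hu with h | h
          · exact h
          · exact absurd h hnotst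
        by_cases hcur : u = cur
        · exact p3 v (hcur ▸ hv)
        · have hnr : u ∉ (cur :: rest) := by
            intro hmem
            rcases List.mem_cons.1 hmem with h | h
            · exact hcur h
            · exact hnotst (p5 u h)
          exact p1 v (hcl u huv hnr v hv)
      have hvis_le : visited.length
          ≤ ((graph.getD cur []).foldl pvA_step (rest, visited)).2.length := by omega
      obtain ⟨q1, q2, q3⟩ := ih _ _ (p7 hnd) hsv' hvN' hcl' (by simp at hfuel; omega)
      exact ⟨fun x h => q1 x (p1 x h), q2, q3⟩

theorem pv_add_prefix (s : PySem.Set Int) (x : Int) : s <+: PySem.Set.add s x := by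
  rw [PySem.Set.add_eq_ite]
  split_ifs
  · exact List.prefix_rfl
  · exact ⟨[x], rfl⟩

theorem pvB_step_prefix (wires : List (List Int)) (i : Int) (acc : PySem.Set Int) (j : Int) :
    acc <+: pvB_step wires i acc j := by
  simp only [pvB_step]
  split_ifs <;>
    first
      | exact List.prefix_rfl
      | exact pv_add_prefix _ _
      | exact (pv_add_prefix _ _).trans (pv_add_prefix _ _)

theorem pvB_step_mem (wires : List (List Int)) (i : Int) (acc : PySem.Set Int) (j x : Int)
    (h : x ∈ pvB_step wires i acc j) : x ∈ acc ∨ x = pvW0 wires j ∨ x = pvW1 wires j := by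
  simp only [pvB_step] at h
  unfold pvW0 pvW1
  split_ifs at h <;>
    first
      | (simp only [PySem.Set.mem_add] at h; tauto)
      | tauto

theorem pvB_step_nodup (wires : List (List Int)) (i : Int) (acc : PySem.Set Int) (j : Int)
    (h : acc.Nodup) : (pvB_step wires i acc j).Nodup := by
  simp only [pvB_step]
  split_ifs <;>
    first
      | exact h
      | exact PySem.Set.nodup_add _ _ h
      | exact PySem.Set.nodup_add _ _ (PySem.Set.nodup_add _ _ h)

theorem pvB_step_w1 (wires : List (List Int)) (i : Int) (acc : PySem.Set Int) (j : Int)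
    (hji : j ≠ i) (h : pvW0 wires j ∈ acc) : pvW1 wires j ∈ pvB_step wires i acc j := by
  unfold pvB_step
  rw [if_pos hji]
  simp only [pvW0] at h
  simp only [pvW1]
  split_ifs <;> simp_all [PySem.Set.mem_add]

theorem pvB_step_w0 (wires : List (List Int)) (i : Int) (acc : PySem.Set Int) (j : Int)
    (hji : j ≠ i) (h : pvW1 wires j ∈ acc) : pvW0 wires j ∈ pvB_step wires i acc j := by
  unfold pvB_step
  rw [if_pos hji]
  simp only [pvW1] at h
  simp only [pvW0]
  split_ifs <;> simp_all

-- the pass only appends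
theorem pvB_fold_prefix (wires : List (List Int)) (i : Int) :
    ∀ (l : List Int) (comp : PySem.Set Int), comp <+: l.foldl (pvB_step wires i) comp := by
  intro l
  induction l with
  | nil => exact fun comp => List.prefix_rfl
  | cons j l ih =>
    intro comp
    exact (pvB_step_prefix wires i comp j).trans (ih _)

theorem pvB_fold_nodup (wires : List (List Int)) (i : Int) :
    ∀ (l : List Int) (comp : PySem.Set Int), comp.Nodup → (l.foldl (pvB_step wires i) comp).Nodup := by
  intro l
  induction l with
  | nil => exact fun comp h => h
  | cons j l ih => exact fun comp h => ih _ (pvB_step_nodup wires i comp j h)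

-- everything the pass adds is a wire endpoint
theorem pvB_fold_mem_N (wires : List (List Int)) (i : Int) :
    ∀ (l : List Int), (∀ j ∈ l, j ∈ PySem.List.pyRange 0 wires.length 1) →
      ∀ (comp : PySem.Set Int) (x : Int), x ∈ l.foldl (pvB_step wires i) comp → x ∈ comp ∨ x ∈ pvN wires := by
  intro l hl
  induction l with
  | nil => exact fun comp x h => Or.inl h
  | cons j l ih =>
    intro comp x h
    have hj := hl j List.mem_cons_self
    rcases ih (fun j' hj' => hl j' (List.mem_cons_of_mem j hj')) _ x h with h' | h'
    · rcases pvB_step_mem wires i comp j x h' with h'' | h'' | h''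
      · exact Or.inl h''
      · exact Or.inr (h'' ▸ pvN_w0 wires j hj)
      · exact Or.inr (h'' ▸ pvN_w1 wires j hj)
    · exact Or.inr h'

theorem pvB_step_sound (wires : List (List Int)) (i : Int) (S : List Int)
    (hS : pvClosed wires i S) (j : Int) (hj : j ∈ PySem.List.pyRange 0 wires.length 1)
    (comp : PySem.Set Int) (hsub : ∀ x ∈ comp, x ∈ S) :
    ∀ x ∈ pvB_step wires i comp j, x ∈ S := by
  intro x hx
  by_cases hji : j ≠ i
  · have hcl := hS j hj hji
    simp only [pvW0, pvW1] at hcl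
    simp only [pvB_step, if_pos hji] at hx
    split_ifs at hx <;>
      simp_all [PySem.Set.mem_add] <;>
      rcases hx with hx | hx | hx <;> simp_all
  · simp only [pvB_step, if_neg hji] at hx
    exact hsub x hx

-- the pass stays inside any closed superset
theorem pvB_fold_sound (wires : List (List Int)) (i : Int) (S : List Int)
    (hS : pvClosed wires i S) :
    ∀ (l : List Int), (∀ j ∈ l, j ∈ PySem.List.pyRange 0 wires.length 1) →
      ∀ (comp : PySem.Set Int), (∀ x ∈ comp, x ∈ S) →
      ∀ x ∈ l.foldl (pvB_step wires i) comp, x ∈ S := by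
  intro l
  induction l with
  | nil => exact fun _ comp hc => hc
  | cons j l ih =>
    intro hl comp hc
    exact ih (fun j' hj' => hl j' (List.mem_cons_of_mem j hj')) _
      (pvB_step_sound wires i S hS j (hl j List.mem_cons_self) comp hc)

-- the pass processes every kept wire whose tail end is already present
theorem pvB_fold_progress (wires : List (List Int)) (i : Int) :
    ∀ (l : List Int) (acc comp : PySem.Set Int), (∀ x ∈ comp, x ∈ acc) →
      ∀ j ∈ l, j ≠ i →
        (pvW0 wires j ∈ comp → pvW1 wires j ∈ l.foldl (pvB_step wires i) acc) ∧
        (pvW1 wires j ∈ comp → pvW0 wires j ∈ l.foldl (pvB_step wires i) acc) := by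
  intro l
  induction l with
  | nil => intro acc comp _ j hj; exact absurd hj (List.not_mem_nil)
  | cons j' l ih =>
    intro acc comp hc j hj hji
    rcases List.mem_cons.1 hj with rfl | hj'
    · constructor
      · intro h0
        exact (pvB_fold_prefix wires i l _).subset
          (pvB_step_w1 wires i acc j hji (hc _ h0))
      · intro h1
        exact (pvB_fold_prefix wires i l _).subset
          (pvB_step_w0 wires i acc j hji (hc _ h1))
    · exact ih (pvB_step wires i acc j') comp
        (fun x hx => (pvB_step_prefix wires i acc j').subset (hc x hx)) j hj' hji

theorem pvB_iter_spec (wires : List (List Int)) (i : Int) :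
    ∀ (fuel : Nat) (comp : PySem.Set Int),
      comp.Nodup → (1 : Int) ∈ comp → (∀ x ∈ comp, x ∈ pvN wires) →
      (pvN wires).length + 1 ≤ fuel + comp.length →
      (1 : Int) ∈ pvB_iter wires i fuel comp ∧
      (pvB_iter wires i fuel comp).Nodup ∧
      pvClosed wires i (pvB_iter wires i fuel comp) ∧
      (∀ S, pvClosed wires i S → (∀ x ∈ comp, x ∈ S) → ∀ x ∈ pvB_iter wires i fuel comp, x ∈ S) := by
  intro fuel
  induction fuel with
  | zero =>
    intro comp hnd h1 hN hfuel
    have : comp.length ≤ (pvN wires).length := (hnd.subperm hN).length_le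
    omega
  | succ fuel ih =>
    intro comp hnd h1 hN hfuel
    have hpre : comp <+: pvB_pass wires i comp := pvB_fold_prefix wires i _ comp
    by_cases hlen : (pvB_pass wires i comp).length = comp.length
    · have heq : pvB_pass wires i comp = comp := (hpre.eq_of_length hlen.symm).symm
      have hres : pvB_iter wires i (fuel + 1) comp = comp := by
        simp only [pvB_iter, pvB_pass] at *
        rw [if_pos hlen]
      rw [hres]
      have hclosed : pvClosed wires i comp := by
        intro j hj hji
        have hp := pvB_fold_progress wires i (PySem.List.pyRange 0 wires.length 1)
          comp comp (fun x hx => hx) j hj hji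
        rw [show (PySem.List.pyRange 0 wires.length 1).foldl (pvB_step wires i) comp = comp from heq] at hp
        exact hp
      exact ⟨h1, hnd, hclosed, fun S _ hc x hx => hc x hx⟩
    · have hres : pvB_iter wires i (fuel + 1) comp = pvB_iter wires i fuel (pvB_pass wires i comp) := by
        simp only [pvB_iter, pvB_pass] at *
        rw [if_neg hlen]
      rw [hres]
      have hlt : comp.length < (pvB_pass wires i comp).length :=
        lt_of_le_of_ne hpre.length_le (fun h => hlen h.symm)
      obtain ⟨q1, q2, q3, q4⟩ := ih (pvB_pass wires i comp)
        (pvB_fold_nodup wires i _ comp hnd)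
        (hpre.subset h1)
        (fun x hx => (pvB_fold_mem_N wires i _ (fun j hj => hj) comp x hx).elim (fun h => hN x h) id)
        (by omega)
      exact ⟨q1, q2, q3, fun S hS hc x hx =>
        q4 S hS (fun y hy => pvB_fold_sound wires i S hS _ (fun j hj => hj) comp hc y hy) x hx⟩

-- per removed wire, both component sizes agree
theorem pv_component_len (wires : List (List Int)) (i : Int) :
    (pvA_dfs (pvA_graph wires i) (4 * wires.length + 2) [1] (PySem.Set.add PySem.Set.empty 1)).length
      = (pvB_iter wires i (2 * wires.length + 2) (PySem.Set.ofList [1])).length := by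
  have hstart : PySem.Set.add PySem.Set.empty 1 = ([1] : List Int) := rfl
  have hstart' : PySem.Set.ofList [1] = ([1] : List Int) := rfl
  rw [hstart, hstart']
  have hN : ∀ u v : Int, v ∈ (pvA_graph wires i).getD u [] → v ∈ pvN wires := by
    intro u v hv
    rcases (pvA_graph_mem wires i u v).1 hv with ⟨j, hj, _, ⟨_, rfl⟩ | ⟨_, rfl⟩⟩
    · exact pvN_w1 wires j hj
    · exact pvN_w0 wires j hj
  have hNlen := pvN_len wires
  -- A side
  obtain ⟨a1, a2, a3⟩ := pvA_dfs_spec (pvA_graph wires i) (pvN wires) hN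
    (4 * wires.length + 2) [1] [1]
    (by simp)
    (by intro x hx; exact hx)
    (by intro x hx; simpa using (List.mem_singleton.1 hx) ▸ pvN_one wires)
    (by
      intro u hu hnot
      exact absurd (List.mem_singleton.1 hu ▸ List.mem_singleton.2 rfl) hnot)
    (by simp; omega)
  have hAone : (1 : Int) ∈ pvA_dfs (pvA_graph wires i) (4 * wires.length + 2) [1] [1] :=
    a1 1 (List.mem_singleton.2 rfl)
  have hAclosed : pvClosed wires i (pvA_dfs (pvA_graph wires i) (4 * wires.length + 2) [1] [1]) := by
    intro j hj hji
    constructor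
    · intro h0
      refine a3 _ h0 (pvW1 wires j) ?_
      exact (pvA_graph_mem wires i _ _).2 ⟨j, hj, hji, Or.inl ⟨rfl, rfl⟩⟩
    · intro h1
      refine a3 _ h1 (pvW0 wires j) ?_
      exact (pvA_graph_mem wires i _ _).2 ⟨j, hj, hji, Or.inr ⟨rfl, rfl⟩⟩
  -- B side
  obtain ⟨b1, b2, b3, b4⟩ := pvB_iter_spec wires i (2 * wires.length + 2) [1]
    (by simp) (by simp) (by intro x hx; simpa using (List.mem_singleton.1 hx) ▸ pvN_one wires)
    (by omega)
  -- mutual inclusion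
  have hAB : ∀ x ∈ pvA_dfs (pvA_graph wires i) (4 * wires.length + 2) [1] [1],
      x ∈ pvB_iter wires i (2 * wires.length + 2) [1] := by
    refine pvA_dfs_subset (pvA_graph wires i) _ ?_ _ _ _ ?_ ?_
    · intro u hu v hv
      rcases (pvA_graph_mem wires i u v).1 hv with ⟨j, hj, hji, ⟨rfl, rfl⟩ | ⟨rfl, rfl⟩⟩
      · exact (b3 j hj hji).1 hu
      · exact (b3 j hj hji).2 hu
    · intro x hx
      exact List.mem_singleton.1 hx ▸ b1
    · intro x hx
      exact List.mem_singleton.1 hx ▸ b1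
  have hBA : ∀ x ∈ pvB_iter wires i (2 * wires.length + 2) [1],
      x ∈ pvA_dfs (pvA_graph wires i) (4 * wires.length + 2) [1] [1] := by
    refine b4 _ hAclosed ?_
    intro x hx
    exact List.mem_singleton.1 hx ▸ hAone
  exact ((List.perm_ext_iff_of_nodup a2 b2).2 (fun a => ⟨hAB a, hBA a⟩)).length_eq

-- ===== VERDICT (by name: the statement is the Claim_ definition above) =====
theorem solution_spec : Claim_equal_solution := by
  intro n wires _ _
  unfold Spec_solution solution solution_alt
  refine PySem.List.foldl_congr_mem _ _ _ _ ?_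
  intro acc i _
  dsimp only
  rw [pv_component_len]
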